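-- pv_equiv track=rewrite | github.com/laurhawk/Comp431 | hw3/Server.py | whitespace
-- ===== SOURCE A (Python) =====
-- def whitespace(s):
--     if len(s) <= 1:
--         return sp(s)
--     space = sp(s[:1])
--     if space < 0:
--         return space
--     whitesp = whitespace(s[1:])
--     if whitesp < 0:
--         return whitesp
--     return space + whitesp
--
-- def sp(c):
--     if c == ' ' or c == '\t':
--         return 1
--     return -2
-- ===== SOURCE B (Python) =====
-- def whitespace(s):
--     # Single pass: length if nonempty and all whitespace chars, else -2.
--     if s and all(ch == ' ' or ch == '\t' for ch in s):
--         return len(s)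
--     return -2
-- ===== Notes on version B (the rewrite author's own statement) =====
-- stated objective: simpler
-- what changed: Replaced the slice-and-recurse accumulation with a single linear scan: return the length when the string is nonempty and every char is a whitespace char, otherwise -2.
import Mathlib
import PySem

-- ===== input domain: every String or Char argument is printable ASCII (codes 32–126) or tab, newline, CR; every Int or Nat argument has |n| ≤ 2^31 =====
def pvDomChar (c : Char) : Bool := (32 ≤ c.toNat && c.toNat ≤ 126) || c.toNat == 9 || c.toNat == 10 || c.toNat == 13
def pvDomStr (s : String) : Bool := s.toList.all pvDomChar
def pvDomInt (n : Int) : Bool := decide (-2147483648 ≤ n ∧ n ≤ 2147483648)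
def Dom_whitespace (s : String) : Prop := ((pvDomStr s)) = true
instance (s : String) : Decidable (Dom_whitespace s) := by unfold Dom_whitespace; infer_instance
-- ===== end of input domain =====

-- B replaces A's slice-copying recursion by one linear scan (len(s) if nonempty all-whitespace, else -2); objective: simpler.

-- ===== PORT A =====
-- sp(c): c is a string (here a list of chars of length ≤ 1 in every call A makes)
def spA (c : List Char) : Int := if c = [' '] ∨ c = ['\t'] then 1 else -2

-- whitespace, recursion on the character list (s[:1] = take 1, s[1:] = drop 1)
def wsAuxA (l : List Char) : Int :=
  if l.length ≤ 1 then spA l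
  else
    let space := spA (l.take 1)
    if space < 0 then space
    else
      let whitesp := wsAuxA (l.drop 1)
      if whitesp < 0 then whitesp
      else space + whitesp
termination_by l.length
decreasing_by simp; omega

def whitespace (s : String) : Int := wsAuxA s.toList

-- ===== PORT B =====
def whitespace_alt (s : String) : Int :=
  if s.toList ≠ [] ∧ s.toList.all (fun ch => ch == ' ' || ch == '\t') then
    (s.toList.length : Int)
  else -2

-- ===== PRECONDITION & SPEC =====
def Spec_whitespace (s : String) (out : Int) : Prop := out = whitespace_alt s
instance (s : String) (out : Int) : Decidable (Spec_whitespace s out) := by unfold Spec_whitespace; infer_instance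

-- ===== CLAIM (what is proved, stated in full; the proofs are below) =====
def Claim_equal_whitespace : Prop := ∀ (s : String), Dom_whitespace s → Spec_whitespace s (whitespace s)

-- ===== LEMMAS AND PROOFS =====
lemma wsAuxA_closed (l : List Char) :
    wsAuxA l = if l ≠ [] ∧ l.all (fun ch => ch == ' ' || ch == '\t') then (l.length : Int) else -2 := by
  induction l with
  | nil => simp [wsAuxA, spA]
  | cons c rest ih =>
    rw [wsAuxA]
    cases rest with
    | nil =>
      by_cases h : c = ' ' ∨ c = '\t'
      · rcases h with h | h <;> simp [spA, h]
      · have h1 : c ≠ ' ' := fun e => h (Or.inl e)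
        have h2 : c ≠ '\t' := fun e => h (Or.inr e)
        simp [spA, h1, h2]
    | cons d rest' =>
      rw [if_neg (by simp : ¬ ((c :: d :: rest').length ≤ 1))]
      simp only [List.take_succ_cons, List.take_zero, List.drop_succ_cons, List.drop_zero]
      by_cases hc : c = ' ' ∨ c = '\t'
      · have hsp : spA [c] = 1 := by rcases hc with h | h <;> simp [spA, h]
        have hcb : (c == ' ' || c == '\t') = true := by rcases hc with h | h <;> simp [h]
        rw [hsp, if_neg (by norm_num : ¬ ((1:Int) < 0))]
        simp only [ih]
        by_cases hr : ((d :: rest').all fun ch => ch == ' ' || ch == '\t') = true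
        · simp [hr, hcb]
          split_ifs with h <;> omega
        · simp [hr]
      · have h1 : c ≠ ' ' := fun e => hc (Or.inl e)
        have h2 : c ≠ '\t' := fun e => hc (Or.inr e)
        have hsp : spA [c] = -2 := by simp [spA, h1, h2]
        rw [hsp, if_pos (by norm_num : ((-2:Int)) < 0)]
        simp [h1, h2]

theorem whitespace_eq_alt (s : String) : whitespace s = whitespace_alt s := by
  simp [whitespace, whitespace_alt, wsAuxA_closed]

-- ===== VERDICT (by name: the statement is the Claim_ definition above) =====
theorem whitespace_spec : Claim_equal_whitespace := by
  intro s _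
  unfold Spec_whitespace
  exact whitespace_eq_alt s
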